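-- pv_equiv track=rewrite | github.com/Mminy62/algorithm | 프로그래머스/2/131127. 할인 행사/할인 행사.py | solution
-- ===== SOURCE A (Python) =====
-- from copy import deepcopy
--
-- def solution(want, number, discount):
--     answer = 0
--     info = {}
--     for key, value in zip(want, number):
--         info[key] = value
--
--     # info 를 카피한 걸 value의 합이 다 0이면 ok
--     n = len(discount)
--     for start in range(n - 10 + 1):
--         cnt = 10
--         temp_info = deepcopy(info)
--
--         for i in range(start, start + 10):
--             item = discount[i]
--             if item in want and temp_info[item] > 0:
--                 temp_info[item] -= 1
--                 cnt -= 1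
--             else:
--                 break
--
--         if cnt == 0:
--             answer += 1
--
--     return answer
-- ===== SOURCE B (Python) =====
-- def solution(want, number, discount):
--     need = {}
--     for k, v in zip(want, number):
--         need[k] = v
--     answer = 0
--     for start in range(len(discount) - 9):
--         window = discount[start:start + 10]
--         if all(x in need and window.count(x) <= need[x] for x in window):
--             answer += 1
--     return answer
-- ===== Notes on version B (the rewrite author's own statement) =====
-- stated objective: faster
-- what changed: A deep-copies the want/number dict for every window start and simulates a decrement-and-break scan; B checks each window directly by membership and occurrence counts (window.count(x) <= need[x]) with no dict copying or mutation.
import Mathlib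
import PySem

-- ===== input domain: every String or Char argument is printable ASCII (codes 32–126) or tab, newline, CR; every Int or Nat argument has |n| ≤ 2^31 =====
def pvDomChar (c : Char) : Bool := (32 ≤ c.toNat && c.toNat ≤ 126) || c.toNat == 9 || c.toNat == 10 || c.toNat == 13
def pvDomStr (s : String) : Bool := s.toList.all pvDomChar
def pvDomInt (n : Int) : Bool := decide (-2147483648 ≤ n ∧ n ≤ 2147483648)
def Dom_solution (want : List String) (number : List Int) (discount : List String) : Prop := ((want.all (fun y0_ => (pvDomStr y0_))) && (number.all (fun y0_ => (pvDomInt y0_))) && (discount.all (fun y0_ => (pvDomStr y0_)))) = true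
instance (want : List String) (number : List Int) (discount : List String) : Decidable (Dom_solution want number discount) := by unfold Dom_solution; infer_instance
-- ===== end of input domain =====

-- B replaces A's per-start deepcopy + decrement-and-break scan by a per-window count check (no dict copying); Pre_ excludes inputs where some wanted item has no zipped quantity, on which A can raise KeyError.


-- ===== PORT A =====
-- inner 'for i in range(start, start+10)' loop with its break, over the remaining index list;
-- 'temp_info[item]' is read as getD 0: exact whenever the key exists, which Pre_ guarantees
-- for every item in want (Python raises KeyError otherwise, excluded by Pre_).
def scanA (want : List String) (discount : List String) : List Int → Int → PySem.Dict String Int → Int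
  | [], cnt, _ => cnt
  | i :: rest, cnt, temp_info =>
      let item := PySem.List.pyGetD discount i ""
      if want.contains item ∧ 0 < temp_info.getD item 0 then
        scanA want discount rest (cnt - 1) (temp_info.modify item 0 (· - 1))
      else cnt

def solution (want : List String) (number : List Int) (discount : List String) : Int :=
  let info := (want.zip number).foldl (fun d kv => d.insert kv.1 kv.2) PySem.Dict.empty
  let n : Int := discount.length
  (PySem.List.pyRange 0 (n - 10 + 1) 1).foldl
    (fun answer start =>
      let cnt := scanA want discount (PySem.List.pyRange start (start + 10) 1) 10 info
      if cnt = 0 then answer + 1 else answer) 0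

-- ===== PORT B =====
def solution_alt (want : List String) (number : List Int) (discount : List String) : Int :=
  let need := (want.zip number).foldl (fun d kv => d.insert kv.1 kv.2) PySem.Dict.empty
  (PySem.List.pyRange 0 ((discount.length : Int) - 9) 1).foldl
    (fun answer start =>
      let window := PySem.List.slice discount (some start) (some (start + 10))
      if window.all (fun x => need.contains x && decide ((window.count x : Int) ≤ need.getD x 0)) then
        answer + 1
      else answer) 0

-- ===== PRECONDITION & SPEC =====
-- Pre_ excludes inputs where some element of want is not a key of dict(zip(want, number))
-- (it only occurs past the length of number) while occurring in a discount list long enough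
-- to have windows: there A may raise KeyError when such an item is reached during a window
-- scan; the condition is a closed-form sufficient bound on reachability, so it still excludes
-- a few inputs on which A happens to return (the item hides behind an earlier break) — see cites.
def Pre_solution (want : List String) (number : List Int) (discount : List String) : Prop :=
  ∀ x ∈ want, x ∈ want.take number.length ∨ x ∉ discount ∨ discount.length < 10
instance (want : List String) (number : List Int) (discount : List String) : Decidable (Pre_solution want number discount) := by unfold Pre_solution; infer_instance

def pvWitness_solution : List String × List Int × List String :=
  (["a", "b"], [1, 2], ["a", "b", "a", "a", "b", "b", "a", "b", "a", "b", "c"])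

def Spec_solution (want : List String) (number : List Int) (discount : List String) (out : Int) : Prop := out = solution_alt want number discount
instance (want : List String) (number : List Int) (discount : List String) (out : Int) : Decidable (Spec_solution want number discount out) := by unfold Spec_solution; infer_instance

-- ===== CLAIM (what is proved, stated in full; the proofs are below) =====
def Claim_equal_solution : Prop := ∀ (want : List String) (number : List Int) (discount : List String), Dom_solution want number discount → Pre_solution want number discount → Spec_solution want number discount (solution want number discount)

-- ===== LEMMAS AND PROOFS =====

-- proof-side view of A's inner loop: the same scan over the window's items instead of indices
def scanL (want : List String) : List String → Int → PySem.Dict String Int → Int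
  | [], cnt, _ => cnt
  | item :: rest, cnt, temp_info =>
      if want.contains item ∧ 0 < temp_info.getD item 0 then
        scanL want rest (cnt - 1) (temp_info.modify item 0 (· - 1))
      else cnt

theorem map_fst_zip_take {α β : Type} (l₁ : List α) (l₂ : List β) :
    (l₁.zip l₂).map Prod.fst = l₁.take l₂.length := by
  induction l₁ generalizing l₂ with
  | nil => simp
  | cons a t ih =>
    cases l₂ with
    | nil => simp
    | cons b t₂ => simp [ih]

theorem scanA_eq_scanL (want discount : List String) (k : Nat) :
    ∀ (s : Int) (cnt : Int) (temp : PySem.Dict String Int),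
      0 ≤ s → s.toNat + k ≤ discount.length →
      scanA want discount (PySem.List.pyRange s (s + (k : Int)) 1) cnt temp
        = scanL want ((discount.drop s.toNat).take k) cnt temp := by
  induction k with
  | zero =>
    intro s cnt temp hs hlen
    rw [PySem.List.pyRange_one_eq_nil (by omega)]
    simp [scanA, scanL]
  | succ k ih =>
    intro s cnt temp hs hlen
    rw [PySem.List.pyRange_one_cons (by push_cast; omega)]
    have hidx : s.toNat < discount.length := by omega
    have hitem : PySem.List.pyGetD discount s "" = discount[s.toNat] :=
      PySem.List.pyGetD_eq_getElem (xs := discount) (i := s) (d := "") hs (by exact_mod_cast (by omega : s < (discount.length : Int)))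
    rw [List.drop_eq_getElem_cons hidx, List.take_succ_cons]
    show scanA _ _ _ _ _ = scanL _ _ _ _
    unfold scanA scanL
    rw [hitem]
    by_cases h : want.contains discount[s.toNat] ∧ 0 < temp.getD discount[s.toNat] 0
    · simp only [if_pos h]
      have harg : s + ((k : Nat) + 1 : Int) = (s + 1) + (k : Int) := by ring
      have : (s + ((k + 1 : Nat) : Int)) = (s + 1) + (k : Int) := by push_cast; ring
      rw [this]
      have := ih (s + 1) (cnt - 1) (temp.modify discount[s.toNat] 0 (· - 1)) (by omega) (by omega)
      rwa [show (s + 1).toNat = s.toNat + 1 by omega] at this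
    · simp only [if_neg h]

theorem scanL_eq_iff (want : List String) (ws : List String) :
    ∀ (cnt : Int) (temp : PySem.Dict String Int),
      scanL want ws cnt temp = cnt - ws.length ↔
        ∀ x ∈ ws, want.contains x = true ∧ (ws.count x : Int) ≤ temp.getD x 0 := by
  induction ws with
  | nil => intro cnt temp; simp [scanL]
  | cons a t ih =>
    intro cnt temp
    show scanL want (a :: t) cnt temp = _ ↔ _
    unfold scanL
    by_cases h : want.contains a ∧ 0 < temp.getD a 0
    · rw [if_pos h]
      have hlen : cnt - (((a :: t).length : Nat) : Int) = (cnt - 1) - (t.length : Int) := by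
        push_cast [List.length_cons]; ring
      rw [hlen, ih (cnt - 1) (temp.modify a 0 (· - 1))]
      constructor
      · intro H x hx
        rcases List.mem_cons.mp hx with rfl | hx'
        · refine ⟨h.1, ?_⟩
          rw [List.count_cons_self]
          by_cases hxt : x ∈ t
          · have h2 := (H x hxt).2
            rw [PySem.Dict.getD_modify, if_pos rfl] at h2
            push_cast
            omega
          · have h0 : t.count x = 0 := List.count_eq_zero.mpr hxt
            rw [h0]
            push_cast
            omega
        · have h1 := H x hx'
          rw [PySem.Dict.getD_modify] at h1
          by_cases hxa : x = a
          · subst hxa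
            refine ⟨h1.1, ?_⟩
            rw [List.count_cons_self]
            rw [if_pos rfl] at h1
            push_cast
            omega
          · refine ⟨h1.1, ?_⟩
            rw [List.count_cons_of_ne (by intro he; exact hxa he.symm)]
            simpa [if_neg hxa] using h1.2
      · intro H x hx
        have h1 := H x (List.mem_cons_of_mem a hx)
        rw [PySem.Dict.getD_modify]
        refine ⟨h1.1, ?_⟩
        by_cases hxa : x = a
        · subst hxa
          rw [if_pos rfl]
          have := h1.2
          rw [List.count_cons_self] at this
          push_cast at this ⊢
          omega
        · rw [if_neg hxa]
          have := h1.2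
          rwa [List.count_cons_of_ne (by intro he; exact hxa he.symm)] at this
    · rw [if_neg h]
      constructor
      · intro hEq
        exfalso
        have hl : (((a :: t).length : Nat) : Int) = (t.length : Int) + 1 := by
          push_cast [List.length_cons]; ring
        omega
      · intro H
        exfalso
        have h1 := H a (List.mem_cons_self)
        have hc : 0 < ((a :: t).count a : Int) := by
          rw [List.count_cons_self]; push_cast; omega
        exact h ⟨h1.1, lt_of_lt_of_le hc h1.2⟩

-- ===== VERDICT (by name: the statement is the Claim_ definition above) =====
theorem dict_contains_iff (want : List String) (number : List Int) (x : String) :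
    ((want.zip number).foldl (fun d kv => d.insert kv.1 kv.2) PySem.Dict.empty).contains x = true
      ↔ x ∈ want.take number.length := by
  rw [PySem.Dict.contains_iff_mem_keys,
      PySem.Dict.keys_foldl_insert_key (key := Prod.fst) (f := fun _ kv => kv.2),
      PySem.Dict.keys_empty]
  rw [show PySem.Set.update ([] : List String) ((want.zip number).map Prod.fst)
        = PySem.Set.ofList ((want.zip number).map Prod.fst) from rfl]
  rw [PySem.Set.mem_ofList, map_fst_zip_take]

theorem window_cond_iff (want : List String) (number : List Int) (w : List String)
    (hkw : ∀ x ∈ w, x ∈ want → x ∈ want.take number.length) (hwl : w.length = 10) :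
    (scanL want w 10 ((want.zip number).foldl (fun d kv => d.insert kv.1 kv.2) PySem.Dict.empty) = 0)
      ↔ (w.all (fun x => ((want.zip number).foldl (fun d kv => d.insert kv.1 kv.2) PySem.Dict.empty).contains x
            && decide ((w.count x : Int) ≤ ((want.zip number).foldl (fun d kv => d.insert kv.1 kv.2) PySem.Dict.empty).getD x 0)) = true) := by
  have h0 : (0 : Int) = 10 - ((w.length : Nat) : Int) := by rw [hwl]; norm_num
  conv_lhs => rw [h0]
  rw [scanL_eq_iff, List.all_eq_true]
  constructor
  · intro H x hx
    have h1 := H x hx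
    rw [Bool.and_eq_true, decide_eq_true_iff]
    refine ⟨?_, h1.2⟩
    rw [dict_contains_iff]
    exact hkw x hx (List.contains_iff_mem.mp h1.1)
  · intro H x hx
    have h1 := H x hx
    rw [Bool.and_eq_true, decide_eq_true_iff] at h1
    refine ⟨?_, h1.2⟩
    rw [List.contains_iff_mem]
    exact List.mem_of_mem_take ((dict_contains_iff want number x).mp h1.1)

theorem solution_spec : Claim_equal_solution := by
  unfold Claim_equal_solution
  intro want number discount _hdom hpre
  unfold Spec_solution solution solution_alt
  simp only []
  have h10 : ((discount.length : Int) - 10 + 1) = ((discount.length : Int) - 9) := by ring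
  rw [h10]
  apply PySem.List.foldl_congr_mem
  intro acc start hmem
  rw [PySem.List.mem_pyRange_one] at hmem
  have hs0 : 0 ≤ start := hmem.1
  have hsN : start = ((start.toNat : Nat) : Int) := (Int.toNat_of_nonneg hs0).symm
  have hb : start.toNat + 10 ≤ discount.length := by omega
  have hslice : PySem.List.slice discount (some start) (some (start + 10))
      = (discount.drop start.toNat).take 10 := by
    have h := PySem.List.slice_natCast_add (xs := discount) (j := start.toNat) (n := 10)
    push_cast at h
    rw [hsN]
    exact h
  have hscan := scanA_eq_scanL want discount 10 start 10
      ((want.zip number).foldl (fun d kv => d.insert kv.1 kv.2) PySem.Dict.empty) hs0 hb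
  push_cast at hscan
  rw [hscan, hslice]
  have hwl : ((discount.drop start.toNat).take 10).length = 10 := by
    rw [List.length_take, List.length_drop]
    omega
  have hkw : ∀ x ∈ (discount.drop start.toNat).take 10, x ∈ want → x ∈ want.take number.length := by
    intro x hxw hxwant
    have hxd : x ∈ discount := List.mem_of_mem_drop (List.mem_of_mem_take hxw)
    rcases hpre x hxwant with h | h | h
    · exact h
    · exact absurd hxd h
    · omega
  have hcond := window_cond_iff want number _ hkw hwl
  exact if_congr hcond rfl rfl
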